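-- pv_equiv track=rewrite | github.com/yizhou-tian/comp1730 | assignment_template.py | row_length
-- ===== SOURCE A (Python) =====
-- def row_length (row, reference_height, inf, sup):
--
--     length = 0
--     last_point = False
--
--     for i in range (inf, sup):
--
--         if row [i] <= reference_height:
--             if last_point == True:
--                 length += 1
--             else: last_point = True
--
--         else: last_point = False
--
--     return length
-- ===== SOURCE B (Python) =====
-- def row_length(row, reference_height, inf, sup):
--     # combinatorial identity: a maximal run of k consecutive below-threshold
--     # points contributes exactly k - 1 to the answer, so
--     # answer = (#below points) - (#maximal runs of below points).
--     below = sum(1 for i in range(inf, sup) if row[i] <= reference_height)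
--     runs = sum(1 for i in range(inf, sup)
--                if row[i] <= reference_height
--                and (i == inf or row[i - 1] > reference_height))
--     return below - runs
-- ===== Notes on version B (the rewrite author's own statement) =====
-- stated objective: alternative
-- what changed: Replaces the stateful last_point/length scan with a combinatorial identity: answer = (#below-threshold points) - (#maximal runs of below-threshold points), each computed as an independent count over the segment (a run start is a below point whose predecessor is absent or above threshold).
import Mathlib
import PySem

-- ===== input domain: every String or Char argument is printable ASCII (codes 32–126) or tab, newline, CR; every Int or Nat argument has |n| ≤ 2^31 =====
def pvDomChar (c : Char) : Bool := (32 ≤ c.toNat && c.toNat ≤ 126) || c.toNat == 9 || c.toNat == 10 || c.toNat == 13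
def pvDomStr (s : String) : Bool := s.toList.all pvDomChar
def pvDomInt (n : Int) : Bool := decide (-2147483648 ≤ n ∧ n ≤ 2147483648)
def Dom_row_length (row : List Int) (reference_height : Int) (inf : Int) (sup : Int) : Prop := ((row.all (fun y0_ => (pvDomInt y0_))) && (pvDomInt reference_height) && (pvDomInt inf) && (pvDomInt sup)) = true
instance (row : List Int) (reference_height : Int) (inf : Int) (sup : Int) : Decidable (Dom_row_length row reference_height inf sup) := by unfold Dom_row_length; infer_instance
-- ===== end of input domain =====

-- B replaces A's stateful scan by the combinatorial identity
-- answer = (#below-threshold points) - (#maximal runs of below-threshold points),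
-- each an independent count over the segment (objective: alternative, same O(n) cost).

-- ===== PORT A =====
-- the for-loop with state (length, last_point); row[i] via pyGetD (Pre_ guarantees in range)
def row_length (row : List Int) (reference_height : Int) (inf : Int) (sup : Int) : Int :=
  ((PySem.List.pyRange inf sup 1).foldl
    (fun (s : Int × Bool) i =>
      if PySem.List.pyGetD row i 0 ≤ reference_height then
        (if s.2 = true then (s.1 + 1, s.2) else (s.1, true))
      else (s.1, false))
    (0, false)).1

-- ===== PORT B =====
-- two independent counts over range(inf, sup): below points, and run starts
def row_length_alt (row : List Int) (reference_height : Int) (inf : Int) (sup : Int) : Int :=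
  let below : Int :=
    ((PySem.List.pyRange inf sup 1).countP
      (fun i => decide (PySem.List.pyGetD row i 0 ≤ reference_height)) : Int)
  let runs : Int :=
    ((PySem.List.pyRange inf sup 1).countP
      (fun i => decide (PySem.List.pyGetD row i 0 ≤ reference_height) &&
        (decide (i = inf) || !decide (PySem.List.pyGetD row (i - 1) 0 ≤ reference_height))) : Int)
  below - runs

-- ===== PRECONDITION & SPEC =====
-- Pre_ excludes exactly the inputs where Python's row[i] raises IndexError for some i in range(inf, sup).
def Pre_row_length (row : List Int) (reference_height : Int) (inf : Int) (sup : Int) : Prop :=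
  sup ≤ inf ∨ (-(row.length : Int) ≤ inf ∧ sup ≤ (row.length : Int))
instance (row : List Int) (reference_height : Int) (inf : Int) (sup : Int) : Decidable (Pre_row_length row reference_height inf sup) := by unfold Pre_row_length; infer_instance
def pvWitness_row_length : List Int × Int × Int × Int := ([1, 2, 3], 2, 0, 3)

def Spec_row_length (row : List Int) (reference_height : Int) (inf : Int) (sup : Int) (out : Int) : Prop := out = row_length_alt row reference_height inf sup
instance (row : List Int) (reference_height : Int) (inf : Int) (sup : Int) (out : Int) : Decidable (Spec_row_length row reference_height inf sup out) := by unfold Spec_row_length; infer_instance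

-- ===== CLAIM (what is proved, stated in full; the proofs are below) =====
def Claim_equal_row_length : Prop := ∀ (row : List Int) (reference_height : Int) (inf : Int) (sup : Int), Dom_row_length row reference_height inf sup → Pre_row_length row reference_height inf sup → Spec_row_length row reference_height inf sup (row_length row reference_height inf sup)

-- ===== LEMMAS AND PROOFS =====

-- A's loop step, expressed on the mask value
def pvStep (s : Int × Bool) (b : Bool) : Int × Bool :=
  if b = true then (if s.2 = true then (s.1 + 1, s.2) else (s.1, true)) else (s.1, false)

-- adjacent-pair count of a boolean list with given predecessor
def pvAdj (prev : Bool) (l : List Bool) : Int :=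
  match l with
  | [] => 0
  | b :: l => (if prev && b then 1 else 0) + pvAdj b l

-- run-start count of a boolean list with given predecessor
def pvRuns (prev : Bool) (l : List Bool) : Int :=
  match l with
  | [] => 0
  | b :: l => (if b && !prev then 1 else 0) + pvRuns b l

theorem pvStep_eq (s : Int × Bool) (b : Bool) :
    pvStep s b = (s.1 + (if s.2 && b then 1 else 0), b) := by
  cases s with
  | mk n p => cases b <;> cases p <;> simp [pvStep]

theorem foldl_pvStep (l : List Bool) (n : Int) (b : Bool) :
    (l.foldl pvStep (n, b)).1 = n + pvAdj b l := by
  induction l generalizing n b with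
  | nil => simp [pvAdj]
  | cons c l ih =>
      rw [List.foldl_cons, pvStep_eq, ih]
      simp [pvAdj]; omega

-- the combinatorial identity: #pairs = #below − #run-starts
theorem pvAdj_eq (l : List Bool) (prev : Bool) :
    pvAdj prev l = (l.countP id : Int) - pvRuns prev l := by
  induction l generalizing prev with
  | nil => simp [pvAdj, pvRuns]
  | cons b l ih =>
      rw [pvAdj, pvRuns, ih]
      cases b <;> cases prev <;> simp [List.countP_cons] <;> omega

-- B's run-start count over the range equals pvRuns over the mask
theorem runs_count (f : Int → Bool) (c : Int) :
    ∀ (n : Nat) (a : Int), c < a →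
    ((PySem.List.pyRange a (a + n) 1).countP
      (fun i => f i && (decide (i = c) || !f (i - 1))) : Int)
    = pvRuns (f (a - 1)) ((PySem.List.pyRange a (a + n) 1).map f) := by
  intro n
  induction n with
  | zero =>
      intro a _
      rw [show (a : Int) + ((0:Nat) : Int) = a from by push_cast; ring,
          PySem.List.pyRange_one_eq_nil le_rfl]
      simp [pvRuns]
  | succ m ih =>
      intro a hca
      have hlt : a < a + ((m : Nat) + 1 : Nat) := by push_cast; omega
      rw [PySem.List.pyRange_one_cons hlt]
      have h2 : (a : Int) + ((m : Nat) + 1 : Nat) = (a + 1) + (m : Nat) := by push_cast; ring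
      rw [h2, List.countP_cons, List.map_cons, pvRuns]
      push_cast
      rw [ih (a + 1) (by omega)]
      have hne : (decide (a = c) || !f (a - 1)) = !f (a - 1) := by
        simp [show a ≠ c by omega]
      simp only [hne, show a + 1 - 1 = a from by ring]
      cases f a <;> cases f (a - 1) <;> simp <;> omega

-- ===== VERDICT (by name: the statement is the Claim_ definition above) =====
theorem row_length_spec : Claim_equal_row_length := by
  intro row h inf sup _ _
  unfold Spec_row_length row_length row_length_alt
  dsimp only
  set f : Int → Bool := fun i => decide (PySem.List.pyGetD row i 0 ≤ h) with hf
  -- A's fold, through the mask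
  have hfold :
      (PySem.List.pyRange inf sup 1).foldl
        (fun (s : Int × Bool) i =>
          if PySem.List.pyGetD row i 0 ≤ h then
            (if s.2 = true then (s.1 + 1, s.2) else (s.1, true))
          else (s.1, false))
        (0, false)
      = ((PySem.List.pyRange inf sup 1).map f).foldl pvStep (0, false) := by
    rw [List.foldl_map]
    congr 1
    funext s i
    by_cases hle : PySem.List.pyGetD row i 0 ≤ h <;> simp [pvStep, hf, hle]
  rw [hfold, foldl_pvStep, pvAdj_eq]
  -- below count
  have hbelow : ((PySem.List.pyRange inf sup 1).map f).countP id
      = (PySem.List.pyRange inf sup 1).countP f := by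
    rw [List.countP_map]; rfl
  rw [hbelow]
  -- runs count
  by_cases hle : sup ≤ inf
  · simp [PySem.List.pyRange_one_eq_nil hle, pvRuns]
  · have hlt : inf < sup := by omega
    rw [PySem.List.pyRange_one_cons hlt, List.map_cons, pvRuns,
        List.countP_cons, List.countP_cons]
    have hn : sup = (inf + 1) + (((sup - (inf + 1)).toNat : Nat) : Int) := by omega
    have hr := runs_count f inf (sup - (inf + 1)).toNat (inf + 1) (by omega)
    simp only [hf, show inf + 1 - 1 = inf from by ring] at hr ⊢
    rw [hn]
    push_cast
    rw [hr]
    cases hfi : decide (PySem.List.pyGetD row inf 0 ≤ h) <;> simp [hfi] <;> omega
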